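-- pv_equiv track=rewrite | github.com/Ferrangelo/cosette | src/cosette/varie.py | latex_pnames
-- ===== SOURCE A (Python) =====
-- def latex_pnames(pnames):
--     """
--     Convert a list of parameter names to their LaTeX representations.
--     The input parameter names are expected to be in the SFX_CLASS format.
--
--     This function takes a list of parameter names and returns a new list with the
--     corresponding LaTeX representations. It uses a dictionary to map common parameter
--     names to their LaTeX forms, and also handles parameter names in the form 'b{i}'
--     and 'm{i}' where 'i' is an integer.
--
--     Args:
--         pnames (list): A list of parameter names to be converted to LaTeX.
--
--     Returns:
--         list: A new list with the LaTeX representations of the input parameter names.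
--     """
--     latex_dict = {
--         "w0": r"w_0",
--         "wa": r"w_{\rm a}",
--         "ob": r"\Omega_{\rm b}",
--         "om": r"\Omega_{\rm m}",
--         "sigma8": r"\sigma_8",
--         "tau": r"\tau",
--         "ns": r"n_{\rm s}",
--         "h": r"h",
--         "delta_IG": r"\Delta",
--         "Delta": r"\Delta",
--         "gamma_IG": r"\xi",
--         "mnu": r"\sum m_{\nu} \rm [eV]",
--         "aIA": r"{\cal A}_{\rm IA}",
--         "eIA": r"\eta_{\rm IA}",
--         "bIA": r"\beta_{\rm IA}",
--     }
--     latex_dict.update({f"b{i}": rf"b_{{{i}}}" for i in range(14)})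
--     latex_dict.update({f"bM{i}": rf"b_{{\rm M, {i}}}" for i in range(14)})
--     latex_dict.update({f"m{i}": rf"m_{{{i}}}" for i in range(14)})
--
--     return [latex_dict.get(p, p) for p in pnames]
-- ===== SOURCE B (Python) =====
-- # Simpler: keep only the irregular static table; recognise b{i}/bM{i}/m{i} on the fly.
-- _STATIC = {
--     "w0": r"w_0",
--     "wa": r"w_{\rm a}",
--     "ob": r"\Omega_{\rm b}",
--     "om": r"\Omega_{\rm m}",
--     "sigma8": r"\sigma_8",
--     "tau": r"\tau",
--     "ns": r"n_{\rm s}",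
--     "h": r"h",
--     "delta_IG": r"\Delta",
--     "Delta": r"\Delta",
--     "gamma_IG": r"\xi",
--     "mnu": r"\sum m_{\nu} \rm [eV]",
--     "aIA": r"{\cal A}_{\rm IA}",
--     "eIA": r"\eta_{\rm IA}",
--     "bIA": r"\beta_{\rm IA}",
-- }
--
--
-- def _index(suf):
--     """The integer i with 0 <= i < 14 if suf is exactly str(i), else None."""
--     if suf.isdigit():
--         n = int(suf)
--         if 0 <= n < 14 and str(n) == suf:
--             return n
--     return None
--
--
-- def _one(p):
--     if p in _STATIC:
--         return _STATIC[p]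
--     if p.startswith("bM"):
--         n = _index(p[2:])
--         if n is not None:
--             return rf"b_{{\rm M, {n}}}"
--     elif p.startswith("b"):
--         n = _index(p[1:])
--         if n is not None:
--             return rf"b_{{{n}}}"
--     elif p.startswith("m"):
--         n = _index(p[1:])
--         if n is not None:
--             return rf"m_{{{n}}}"
--     return p
--
--
-- def latex_pnames(pnames):
--     return [_one(p) for p in pnames]
-- ===== Notes on version B (the rewrite author's own statement) =====
-- stated objective: simpler
-- what changed: B keeps only the 15 irregular static entries and recognises b{i}/bM{i}/m{i} (0<=i<14) on the fly by prefix-and-digits matching, instead of pre-expanding the 42 generated keys into a 57-entry lookup table.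
import Mathlib
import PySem

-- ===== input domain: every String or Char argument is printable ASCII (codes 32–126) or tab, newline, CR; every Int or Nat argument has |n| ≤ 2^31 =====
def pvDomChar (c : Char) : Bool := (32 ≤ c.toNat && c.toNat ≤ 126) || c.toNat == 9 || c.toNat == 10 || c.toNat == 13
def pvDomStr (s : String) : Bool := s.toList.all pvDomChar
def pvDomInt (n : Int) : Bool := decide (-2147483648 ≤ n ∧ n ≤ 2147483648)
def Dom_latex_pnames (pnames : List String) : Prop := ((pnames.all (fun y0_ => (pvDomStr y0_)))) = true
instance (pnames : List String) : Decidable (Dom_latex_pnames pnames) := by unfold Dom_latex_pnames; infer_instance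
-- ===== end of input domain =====

-- B keeps only the irregular static table and matches b{i}/bM{i}/m{i} (0 ≤ i < 14) on the fly,
-- instead of A's fully pre-expanded 57-entry dictionary (objective: simpler).

-- ===== PORT A =====
-- the 15 irregular entries of A's latex_dict, in source order
def latexDictStaticA : PySem.Dict String String := PySem.Dict.ofList
  [ ("w0", "w_0"), ("wa", "w_{\\rm a}"), ("ob", "\\Omega_{\\rm b}"), ("om", "\\Omega_{\\rm m}"),
    ("sigma8", "\\sigma_8"), ("tau", "\\tau"), ("ns", "n_{\\rm s}"), ("h", "h"),
    ("delta_IG", "\\Delta"), ("Delta", "\\Delta"), ("gamma_IG", "\\xi"),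
    ("mnu", "\\sum m_{\\nu} \\rm [eV]"), ("aIA", "{\\cal A}_{\\rm IA}"),
    ("eIA", "\\eta_{\\rm IA}"), ("bIA", "\\beta_{\\rm IA}") ]

-- latex_dict after the three .update({f"…{i}": … for i in range(14)}) calls
def latexDictA : PySem.Dict String String :=
  (((latexDictStaticA.update
      ((PySem.List.pyRange 0 14 1).map (fun i =>
        (PySem.Str.join "" ["b", PySem.Int.toStr i],
         PySem.Str.join "" ["b_{", PySem.Int.toStr i, "}"])))).update
      ((PySem.List.pyRange 0 14 1).map (fun i =>
        (PySem.Str.join "" ["bM", PySem.Int.toStr i],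
         PySem.Str.join "" ["b_{\\rm M, ", PySem.Int.toStr i, "}"])))).update
      ((PySem.List.pyRange 0 14 1).map (fun i =>
        (PySem.Str.join "" ["m", PySem.Int.toStr i],
         PySem.Str.join "" ["m_{", PySem.Int.toStr i, "}"]))))

def latex_pnames (pnames : List String) : List String :=
  pnames.map (fun p => latexDictA.getD p p)

-- ===== PORT B =====
-- _STATIC of Source B (same 15 irregular entries)
def latexStaticB : PySem.Dict String String := PySem.Dict.ofList
  [ ("w0", "w_0"), ("wa", "w_{\\rm a}"), ("ob", "\\Omega_{\\rm b}"), ("om", "\\Omega_{\\rm m}"),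
    ("sigma8", "\\sigma_8"), ("tau", "\\tau"), ("ns", "n_{\\rm s}"), ("h", "h"),
    ("delta_IG", "\\Delta"), ("Delta", "\\Delta"), ("gamma_IG", "\\xi"),
    ("mnu", "\\sum m_{\\nu} \\rm [eV]"), ("aIA", "{\\cal A}_{\\rm IA}"),
    ("eIA", "\\eta_{\\rm IA}"), ("bIA", "\\beta_{\\rm IA}") ]

-- _index of Source B: some i iff suf is exactly str(i) with 0 <= i < 14
def latexIndex? (suf : String) : Option Int :=
  if PySem.Str.strIsdigit suf then
    match PySem.Int.ofStr? suf with
    | some n => if 0 ≤ n ∧ n < 14 ∧ PySem.Int.toStr n = suf then some n else none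
    | none => none
  else none

-- _one of Source B
def latexOne (p : String) : String :=
  match latexStaticB.get? p with
  | some v => v
  | none =>
    if PySem.Str.startswith p "bM" then
      match latexIndex? (PySem.Str.slice p (some 2) none) with
      | some n => PySem.Str.join "" ["b_{\\rm M, ", PySem.Int.toStr n, "}"]
      | none => p
    else if PySem.Str.startswith p "b" then
      match latexIndex? (PySem.Str.slice p (some 1) none) with
      | some n => PySem.Str.join "" ["b_{", PySem.Int.toStr n, "}"]
      | none => p
    else if PySem.Str.startswith p "m" then
      match latexIndex? (PySem.Str.slice p (some 1) none) with
      | some n => PySem.Str.join "" ["m_{", PySem.Int.toStr n, "}"]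
      | none => p
    else p

def latex_pnames_alt (pnames : List String) : List String :=
  pnames.map latexOne

-- ===== PRECONDITION & SPEC =====
def Spec_latex_pnames (pnames : List String) (out : List String) : Prop := out = latex_pnames_alt pnames
instance (pnames : List String) (out : List String) : Decidable (Spec_latex_pnames pnames out) := by unfold Spec_latex_pnames; infer_instance

-- ===== CLAIM (what is proved, stated in full; the proofs are below) =====
def Claim_equal_latex_pnames : Prop := ∀ (pnames : List String), Dom_latex_pnames pnames → Spec_latex_pnames pnames (latex_pnames pnames)

-- ===== LEMMAS AND PROOFS =====

-- the 57 keys of A's fully-expanded dictionary, in insertion order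
def latexKeys : List String :=
  [ "w0", "wa", "ob", "om", "sigma8", "tau", "ns", "h", "delta_IG", "Delta", "gamma_IG",
    "mnu", "aIA", "eIA", "bIA",
    "b0", "b1", "b2", "b3", "b4", "b5", "b6", "b7", "b8", "b9", "b10", "b11", "b12", "b13",
    "bM0", "bM1", "bM2", "bM3", "bM4", "bM5", "bM6", "bM7", "bM8", "bM9", "bM10", "bM11", "bM12", "bM13",
    "m0", "m1", "m2", "m3", "m4", "m5", "m6", "m7", "m8", "m9", "m10", "m11", "m12", "m13" ]

set_option maxRecDepth 4000 in
theorem latexDictA_keys : latexDictA.keys = latexKeys := by decide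

-- a string with prefix pre (as a startswith test) is pre followed by its slice from pre's length
theorem eq_of_startswith_slice₂ (p suf : String)
    (h1 : PySem.Str.startswith p "bM" = true)
    (h2 : (PySem.Str.slice p (some 2) none) = suf) :
    p = String.ofList ("bM".toList ++ suf.toList) := by
  have hpre : "bM".toList <+: p.toList := by
    simpa [PySem.Chars.startswith_iff] using h1
  obtain ⟨t, ht⟩ := hpre
  have hs : (PySem.Str.slice p (some 2) none).toList = p.toList.drop 2 := by simp [pysem]
  rw [h2] at hs
  refine (String.ofList_eq.mpr ?_).symm
  rw [← ht] at hs ⊢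
  simp at hs
  rw [hs]

theorem eq_of_startswith_slice₁ (p suf : String) (c : Char)
    (h1 : PySem.Str.startswith p (String.ofList [c]) = true)
    (h2 : (PySem.Str.slice p (some 1) none) = suf) :
    p = String.ofList (c :: suf.toList) := by
  have hpre : (String.ofList [c]).toList <+: p.toList := by
    simpa [PySem.Chars.startswith_iff] using h1
  rw [String.toList_ofList] at hpre
  obtain ⟨t, ht⟩ := hpre
  have hs : (PySem.Str.slice p (some 1) none).toList = p.toList.drop 1 := by simp [pysem]
  rw [h2] at hs
  refine (String.ofList_eq.mpr ?_).symm
  rw [← ht] at hs ⊢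
  simp at hs
  rw [hs]
  rfl

-- the index test succeeds only on the fourteen literal strings "0"…"13"
theorem latexIndex?_eq_some (suf : String) (n : Int) (h : latexIndex? suf = some n) :
    0 ≤ n ∧ n < 14 ∧ PySem.Int.toStr n = suf := by
  unfold latexIndex? at h
  split_ifs at h with h1
  cases hof : PySem.Int.ofStr? suf with
  | none => rw [hof] at h; simp at h
  | some m =>
    rw [hof] at h
    simp only at h
    split_ifs at h with h2
    cases h; exact h2

-- per-element agreement: A's table lookup = B's _one
set_option maxRecDepth 4000 in
theorem elem_eq (p : String) : latexDictA.getD p p = latexOne p := by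
  by_cases hm : p ∈ latexKeys
  · fin_cases hm <;> decide
  · -- A side: p is not a key, the lookup defaults to p
    have hc : latexDictA.contains p = false := by
      rw [PySem.Dict.contains_eq_decide_mem_keys, latexDictA_keys]
      simpa using hm
    rw [PySem.Dict.getD_of_not_contains _ _ hc]
    -- B side: every branch falls through to p
    unfold latexOne
    have hstat : latexStaticB.get? p = none := by
      rw [PySem.Dict.get?_eq_none_iff_not_mem_keys]
      intro hk
      refine hm ?_
      rw [show latexKeys = latexStaticB.keys ++
        [ "b0", "b1", "b2", "b3", "b4", "b5", "b6", "b7", "b8", "b9", "b10", "b11", "b12", "b13",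
          "bM0", "bM1", "bM2", "bM3", "bM4", "bM5", "bM6", "bM7", "bM8", "bM9", "bM10", "bM11", "bM12", "bM13",
          "m0", "m1", "m2", "m3", "m4", "m5", "m6", "m7", "m8", "m9", "m10", "m11", "m12", "m13" ] from by decide]
      exact List.mem_append_left _ hk
    rw [hstat]
    simp only
    split_ifs with hbM hb hmm
    · cases hix : latexIndex? (PySem.Str.slice p (some 2) none) with
      | none => rfl
      | some n =>
        exfalso
        obtain ⟨hn0, hn14, hts⟩ := latexIndex?_eq_some _ _ hix
        have hp := eq_of_startswith_slice₂ p _ hbM hts.symm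
        interval_cases n <;> exact hm (by rw [hp]; decide)
    · cases hix : latexIndex? (PySem.Str.slice p (some 1) none) with
      | none => rfl
      | some n =>
        exfalso
        obtain ⟨hn0, hn14, hts⟩ := latexIndex?_eq_some _ _ hix
        have hb' : PySem.Str.startswith p (String.ofList ['b']) = true := by
          simpa using hb
        have hp := eq_of_startswith_slice₁ p _ 'b' hb' hts.symm
        interval_cases n <;> exact hm (by rw [hp]; decide)
    · cases hix : latexIndex? (PySem.Str.slice p (some 1) none) with
      | none => rfl
      | some n =>
        exfalso
        obtain ⟨hn0, hn14, hts⟩ := latexIndex?_eq_some _ _ hix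
        have hm' : PySem.Str.startswith p (String.ofList ['m']) = true := by
          simpa using hmm
        have hp := eq_of_startswith_slice₁ p _ 'm' hm' hts.symm
        interval_cases n <;> exact hm (by rw [hp]; decide)
    · rfl

-- ===== VERDICT (by name: the statement is the Claim_ definition above) =====
theorem latex_pnames_spec : Claim_equal_latex_pnames := by
  intro pnames _
  unfold Spec_latex_pnames latex_pnames latex_pnames_alt
  exact List.map_congr_left (fun p _ => elem_eq p)
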